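-- pv_equiv track=rewrite | github.com/Bmw4134/TRAXOVO_V1 | archived_modules_20250604_153141/qq_ui_ux_patch_applicator.py | fix_spacing_consistency
-- ===== SOURCE A (Python) =====
-- def fix_spacing_consistency(content):
--     """Fix spacing inconsistencies"""
--     # Replace common spacing patterns with design system variables
--     spacing_replacements = {
--         'margin: 8px': 'margin: var(--space-sm)',
--         'margin: 16px': 'margin: var(--space-md)',
--         'margin: 24px': 'margin: var(--space-lg)',
--         'padding: 8px': 'padding: var(--space-sm)',
--         'padding: 16px': 'padding: var(--space-md)',
--         'padding: 24px': 'padding: var(--space-lg)',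
--         'gap: 8px': 'gap: var(--space-sm)',
--         'gap: 16px': 'gap: var(--space-md)',
--         'gap: 24px': 'gap: var(--space-lg)'
--     }
--
--     for old_spacing, new_spacing in spacing_replacements.items():
--         content = content.replace(old_spacing, new_spacing)
--
--     return content
-- ===== SOURCE B (Python) =====
-- def fix_spacing_consistency(content):
--     """Fix spacing inconsistencies"""
--     sizes = {'8px': 'sm', '16px': 'md', '24px': 'lg'}
--     spacing_replacements = {
--         f'{prop}: {px}': f'{prop}: var(--space-{sz})'
--         for prop in ('margin', 'padding', 'gap')
--         for px, sz in sizes.items()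
--     }
--     # single left-to-right pass: the nine patterns are pairwise non-overlapping
--     # and no replacement creates a new match, so one pass equals nine passes
--     out = []
--     i = 0
--     n = len(content)
--     while i < n:
--         for old, new in spacing_replacements.items():
--             if content.startswith(old, i):
--                 out.append(new)
--                 i += len(old)
--                 break
--         else:
--             out.append(content[i])
--             i += 1
--     return ''.join(out)
-- ===== Notes on version B (the rewrite author's own statement) =====
-- stated objective: alternative
-- what changed: A rewrites the whole string nine times, once per str.replace of a spacing pattern; B makes a single left-to-right pass, checking the nine (pairwise non-overlapping) patterns at each position and emitting the replacement or the character, which is provably the same result since no replacement creates a new match.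
import Mathlib
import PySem

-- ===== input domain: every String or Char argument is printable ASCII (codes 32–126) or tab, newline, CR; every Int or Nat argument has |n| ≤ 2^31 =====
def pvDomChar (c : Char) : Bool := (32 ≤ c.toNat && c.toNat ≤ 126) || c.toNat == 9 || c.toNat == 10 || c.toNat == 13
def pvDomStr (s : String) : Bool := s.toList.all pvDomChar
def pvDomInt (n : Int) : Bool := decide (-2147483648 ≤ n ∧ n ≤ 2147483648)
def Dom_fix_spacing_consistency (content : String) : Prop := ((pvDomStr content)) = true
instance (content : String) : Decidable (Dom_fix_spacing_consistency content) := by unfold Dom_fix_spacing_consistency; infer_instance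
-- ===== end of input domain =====

-- B replaces A's nine sequential full-string str.replace passes by ONE simultaneous
-- left-to-right scan (the nine patterns never overlap and no replacement creates a
-- new match, so the results coincide); objective: alternative algorithm, not speed.

-- ===== PORT A =====
def fix_spacing_consistency (content : String) : String :=
  -- the dict literal (distinct keys, insertion order) and the for-loop over .items()
  let spacing_replacements : PySem.Dict String String := PySem.Dict.mk
    [ ("margin: 8px", "margin: var(--space-sm)")
    , ("margin: 16px", "margin: var(--space-md)")
    , ("margin: 24px", "margin: var(--space-lg)")
    , ("padding: 8px", "padding: var(--space-sm)")
    , ("padding: 16px", "padding: var(--space-md)")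
    , ("padding: 24px", "padding: var(--space-lg)")
    , ("gap: 8px", "gap: var(--space-sm)")
    , ("gap: 16px", "gap: var(--space-md)")
    , ("gap: 24px", "gap: var(--space-lg)") ]
  spacing_replacements.items.foldl (fun c p => PySem.Str.replace c p.1 p.2) content

-- ===== PORT B =====
-- B's dict comprehension (prop × size → pattern/replacement), over lists of code points
def pvProps : List String := ["margin", "padding", "gap"]
def pvSizes : List (String × String) := [("8px", "sm"), ("16px", "md"), ("24px", "lg")]
def pvTableC : List (List Char × List Char) :=
  pvProps.flatMap (fun prop => pvSizes.map (fun s =>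
    ((prop ++ ": " ++ s.1).toList, (prop ++ ": var(--space-" ++ s.2 ++ ")").toList)))

-- the inner for/startswith/break of B: first table entry whose key starts at the cursor
def pvLookup (l : List Char) : Option (List Char × List Char) :=
  pvTableC.find? (fun e => e.1.isPrefixOf l)

-- B's while loop: emit a replacement and skip the key's length, or emit one char.
-- (every key has length ≥ 1, so skipping key.length chars = 1 + (key.length - 1))
def pvScan : List Char → List Char
  | [] => []
  | c :: t =>
    match pvLookup (c :: t) with
    | some e => e.2 ++ pvScan (t.drop (e.1.length - 1))
    | none => c :: pvScan t
termination_by l => l.length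
decreasing_by
  · simp only [List.length_cons]
    have := List.length_drop (l := t) (i := e.1.length - 1)
    omega
  · simp

def fix_spacing_consistency_alt (content : String) : String :=
  String.ofList (pvScan content.toList)

-- ===== PRECONDITION & SPEC =====
def Spec_fix_spacing_consistency (content : String) (out : String) : Prop := out = fix_spacing_consistency_alt content
instance (content : String) (out : String) : Decidable (Spec_fix_spacing_consistency content out) := by unfold Spec_fix_spacing_consistency; infer_instance

-- ===== CLAIM (what is proved, stated in full; the proofs are below) =====
def Claim_equal_fix_spacing_consistency : Prop := ∀ (content : String), Dom_fix_spacing_consistency content → Spec_fix_spacing_consistency content (fix_spacing_consistency content)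

-- ===== LEMMAS AND PROOFS =====

-- A's nine-pass loop, over lists of code points
def pvFoldC (l : List Char) (L : List (List Char × List Char)) : List Char :=
  L.foldl (fun c e => PySem.Chars.replace c e.1 e.2) l

-- all proper suffixes of the table keys (the states a partial key match can be in)
def pvX : List (List Char) := pvTableC.flatMap (fun e => e.1.tails.drop 1)

-- the comprehension evaluated: the nine concrete pattern/replacement pairs
theorem pvTableC_eq : pvTableC =
  [ ("margin: 8px".toList, "margin: var(--space-sm)".toList)
  , ("margin: 16px".toList, "margin: var(--space-md)".toList)
  , ("margin: 24px".toList, "margin: var(--space-lg)".toList)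
  , ("padding: 8px".toList, "padding: var(--space-sm)".toList)
  , ("padding: 16px".toList, "padding: var(--space-md)".toList)
  , ("padding: 24px".toList, "padding: var(--space-lg)".toList)
  , ("gap: 8px".toList, "gap: var(--space-sm)".toList)
  , ("gap: 16px".toList, "gap: var(--space-md)".toList)
  , ("gap: 24px".toList, "gap: var(--space-lg)".toList) ] := by decide

-- ---- finite facts about the nine literal patterns, by decide ----
theorem pvF_len : ∀ e ∈ pvTableC, 2 ≤ e.1.length := by decide

theorem pvF_pairs : ∀ e ∈ pvTableC, ∀ f ∈ pvTableC, e.1 ≠ f.1 → ¬ e.1 <+: f.1 := by decide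

theorem pvF_X : ∀ x ∈ pvX, x = [] ∨
    ∀ e ∈ pvTableC, ¬ x <+: e.1 ∧ ¬ e.1 <+: x ∧ ¬ x <+: e.2 ∧ ¬ e.2 <+: x := by decide

theorem pvF_rep : ∀ e ∈ pvTableC, ∀ x ∈ e.2.tails, x ≠ [] →
    ∀ f ∈ pvTableC, ¬ f.1 <+: x ∧ ¬ x <+: f.1 := by decide

theorem pv_go_acc (old new : List Char) (hold : old ≠ []) :
    ∀ fuel l acc, l.length ≤ fuel →
      PySem.Chars.replace.go old new fuel l acc
        = acc.reverse ++ PySem.Chars.replace.go old new l.length l [] := by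
  intro fuel
  induction fuel using Nat.strong_induction_on with
  | _ fuel IH =>
    intro l acc hle
    match fuel, l with
    | 0, l =>
      have : l = [] := by cases l <;> simp_all
      subst this
      simp [PySem.Chars.replace.go]
    | fuel+1, [] => simp [PySem.Chars.replace.go]
    | fuel+1, c :: t =>
      have holdlen : 1 ≤ old.length := by cases old <;> simp_all
      have hd : ((c::t).drop old.length).length = (c::t).length - old.length :=
        List.length_drop
      simp only [List.length_cons] at hle hd
      by_cases hp : old.isPrefixOf (c :: t) = true
      · rw [show PySem.Chars.replace.go old new (fuel+1) (c::t) acc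
            = PySem.Chars.replace.go old new fuel ((c::t).drop old.length) (new.reverse ++ acc) by
              simp [PySem.Chars.replace.go, hp]]
        rw [show PySem.Chars.replace.go old new ((c::t).length) (c::t) []
            = PySem.Chars.replace.go old new t.length ((c::t).drop old.length) (new.reverse ++ []) by
              simp [PySem.Chars.replace.go, hp]]
        rw [IH fuel (Nat.lt_succ_self _) _ _ (by omega),
            IH t.length (by omega) _ _ (by omega)]
        simp
      · rw [show PySem.Chars.replace.go old new (fuel+1) (c::t) acc
            = PySem.Chars.replace.go old new fuel t (c :: acc) by
              simp [PySem.Chars.replace.go, hp]]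
        rw [show PySem.Chars.replace.go old new ((c::t).length) (c::t) []
            = PySem.Chars.replace.go old new t.length t (c :: []) by
              simp [PySem.Chars.replace.go, hp]]
        rw [IH fuel (Nat.lt_succ_self _) _ _ (by omega),
            IH t.length (by omega) t [c] (le_refl _)]
        simp

theorem pv_replace_nil (old new : List Char) (h : old ≠ []) :
    PySem.Chars.replace [] old new = [] := by
  simp [PySem.Chars.replace, h, PySem.Chars.replace.go]

theorem pv_replace_pos (old new s : List Char) (h : old ≠ []) (hp : old <+: s) :
    PySem.Chars.replace s old new = new ++ PySem.Chars.replace (s.drop old.length) old new := by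
  have hpb : old.isPrefixOf s = true := (PySem.Chars.startswith_iff s old).mpr hp
  cases s with
  | nil => exact absurd (List.eq_nil_of_prefix_nil hp) h
  | cons c t =>
    have holdlen : 1 ≤ old.length := by cases old <;> simp_all
    have hd : ((c::t).drop old.length).length = (c::t).length - old.length := List.length_drop
    simp only [PySem.Chars.replace, List.isEmpty_iff, h, if_false]
    rw [show PySem.Chars.replace.go old new ((c::t).length) (c::t) []
        = PySem.Chars.replace.go old new t.length ((c::t).drop old.length) (new.reverse ++ []) by
          simp [PySem.Chars.replace.go, hpb]]
    rw [pv_go_acc old new h t.length _ _ (by simp at hd ⊢; omega)]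
    simp

theorem pv_replace_neg (old new : List Char) (c : Char) (t : List Char) (h : old ≠ [])
    (hp : ¬ old <+: (c :: t)) :
    PySem.Chars.replace (c :: t) old new = c :: PySem.Chars.replace t old new := by
  have hpb : old.isPrefixOf (c :: t) = false := by
    rcases hb : old.isPrefixOf (c :: t) with _ | _
    · rfl
    · exact absurd ((PySem.Chars.startswith_iff (c :: t) old).mp hb) hp
  simp only [PySem.Chars.replace, List.isEmpty_iff, h, if_false]
  rw [show PySem.Chars.replace.go old new ((c::t).length) (c::t) []
      = PySem.Chars.replace.go old new t.length t [c] by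
        simp [PySem.Chars.replace.go, hpb]]
  rw [pv_go_acc old new h t.length t [c] (le_refl _)]
  simp

theorem pv_skip (old new : List Char) (h : old ≠ []) :
    ∀ u t, (∀ k, k < u.length → ∀ t', ¬ old <+: (u.drop k ++ t')) →
      PySem.Chars.replace (u ++ t) old new = u ++ PySem.Chars.replace t old new := by
  intro u
  induction u with
  | nil => intro t _; simp
  | cons c u' IH =>
    intro t hcond
    have h0 : ¬ old <+: (c :: (u' ++ t)) := by
      have := hcond 0 (by simp) t
      simpa using this
    rw [List.cons_append, pv_replace_neg old new c (u' ++ t) h h0,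
        IH t (fun k hk t' => by
          have := hcond (k+1) (by simp; omega) t'
          simpa using this)]
    simp

theorem pv_mem_X_drop {q rq : List Char} (hm : (q, rq) ∈ pvTableC) {k : Nat}
    (hk : 1 ≤ k) : q.drop k ∈ pvX := by
  have hq2 : 2 ≤ q.length := pvF_len (q, rq) hm
  apply List.mem_flatMap.mpr
  refine ⟨(q, rq), hm, ?_⟩
  cases q with
  | nil => simp at hq2
  | cons a r =>
    simp only [List.tails_cons, List.drop_succ_cons]
    cases k with
    | zero => omega
    | succ k' =>
      simp only [List.drop_succ_cons]
      exact (List.mem_tails _ _).mpr (List.drop_suffix _ _)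

theorem pv_X_tail {x : List Char} (hx : x ∈ pvX) {c : Char} {x' : List Char}
    (he : x = c :: x') : x' ∈ pvX := by
  rcases List.mem_flatMap.mp hx with ⟨e, hem, hxt⟩
  apply List.mem_flatMap.mpr
  refine ⟨e, hem, ?_⟩
  have hq2 : 2 ≤ e.1.length := pvF_len e hem
  rcases hq : e.1 with _ | ⟨a, r⟩
  · simp [hq] at hq2
  · rw [hq] at hxt
    simp only [List.tails_cons] at hxt ⊢
    have hsuf : x <:+ r := (List.mem_tails _ _).mp hxt
    have : x' <:+ x := by rw [he]; exact ⟨[c], rfl⟩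
    exact (List.mem_tails _ _).mpr (this.trans hsuf)

theorem pv_prefix_split {x u t : List Char} (h : x <+: u ++ t) : x <+: u ∨ u <+: x :=
  List.prefix_or_prefix_of_prefix h (List.prefix_append u t)

theorem pv_gen : ∀ n t, t.length ≤ n → ∀ p rep, (p, rep) ∈ pvTableC →
    ∀ x ∈ pvX, x ≠ [] → x <+: PySem.Chars.replace t p rep → x <+: t := by
  intro n
  induction n with
  | zero =>
    intro t ht p rep hm x hx hxne hpre
    have : t = [] := by cases t <;> simp_all
    subst this
    rw [pv_replace_nil _ _ (by have := pvF_len (p,rep) hm; intro h; simp [h] at this)] at hpre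
    exact absurd (List.eq_nil_of_prefix_nil hpre) hxne
  | succ n IH =>
    intro t ht p rep hm x hx hxne hpre
    have hpne : p ≠ [] := by have := pvF_len (p,rep) hm; intro h; simp [h] at this
    have hXfacts := (pvF_X x hx).resolve_left hxne
    by_cases hp : p <+: t
    · rw [pv_replace_pos p rep t hpne hp] at hpre
      rcases pv_prefix_split hpre with h1 | h1
      · exact absurd h1 (hXfacts (p, rep) hm).2.2.1
      · exact absurd h1 (hXfacts (p, rep) hm).2.2.2
    · cases t with
      | nil =>
        rw [pv_replace_nil _ _ hpne] at hpre
        exact absurd (List.eq_nil_of_prefix_nil hpre) hxne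
      | cons c t' =>
        rw [pv_replace_neg p rep c t' hpne hp] at hpre
        rcases hxe : x with _ | ⟨c', x'⟩
        · exact absurd hxe hxne
        · subst hxe
          rcases List.cons_prefix_cons.mp hpre with ⟨hc, hx'⟩
          subst hc
          rcases hx'e : x' with _ | ⟨d, x''⟩
          · simp
          · rw [← hx'e]
            have hx'X : x' ∈ pvX := pv_X_tail hx rfl
            have hx'ne : x' ≠ [] := by simp [hx'e]
            have := IH t' (by simp at ht; omega) p rep hm x' hx'X hx'ne hx'
            exact List.cons_prefix_cons.mpr ⟨rfl, this⟩

theorem pv_keyne {e : List Char × List Char} (he : e ∈ pvTableC) : e.1 ≠ [] := by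
  have := pvF_len e he; intro h; simp [h] at this

theorem pv_foldapp : ∀ L, (∀ e ∈ L, e ∈ pvTableC) →
    ∀ u, (∀ e ∈ L, ∀ k, k < u.length → ∀ t', ¬ e.1 <+: (u.drop k ++ t')) →
    ∀ t, pvFoldC (u ++ t) L = u ++ pvFoldC t L := by
  intro L
  induction L with
  | nil => intro _ u _ t; rfl
  | cons e L' IH =>
    intro hsub u hcond t
    simp only [pvFoldC, List.foldl_cons]
    rw [pv_skip e.1 e.2 (pv_keyne (hsub e (by simp))) u t (hcond e (by simp))]
    exact IH (fun f hf => hsub f (by simp [hf])) u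
      (fun f hf => hcond f (by simp [hf])) (PySem.Chars.replace t e.1 e.2)

theorem pv_foldcons : ∀ L, (∀ e ∈ L, e ∈ pvTableC) →
    ∀ (c : Char) t, (∀ e ∈ L, ¬ e.1 <+: c :: t) →
    pvFoldC (c :: t) L = c :: pvFoldC t L := by
  intro L
  induction L with
  | nil => intro _ c t _; rfl
  | cons e L' IH =>
    intro hsub c t hcond
    simp only [pvFoldC, List.foldl_cons]
    rw [pv_replace_neg e.1 e.2 c t (pv_keyne (hsub e (by simp))) (hcond e (by simp))]
    apply IH (fun f hf => hsub f (by simp [hf])) c (PySem.Chars.replace t e.1 e.2)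
    intro f hf hpref
    have hfT : f ∈ pvTableC := hsub f (by simp [hf])
    have hf2 : 2 ≤ f.1.length := pvF_len f hfT
    rcases hfe : f.1 with _ | ⟨a, x⟩
    · simp [hfe] at hf2
    · rw [hfe] at hpref
      rcases List.cons_prefix_cons.mp hpref with ⟨hc, hx⟩
      subst hc
      have hxX : x ∈ pvX := by
        apply List.mem_flatMap.mpr
        refine ⟨f, hfT, ?_⟩
        rw [hfe]
        simp only [List.tails_cons]
        exact (List.mem_tails _ _).mpr (List.suffix_refl _)
      have hxne : x ≠ [] := by intro h; rw [h] at hfe; simp [hfe] at hf2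
      have hsub2 := hsub e (by simp)
      have := pv_gen t.length t (le_refl _) e.1 e.2 (by
        rcases e with ⟨e1, e2⟩; exact hsub2) x hxX hxne hx
      exact hcond f (by simp [hf]) (by rw [hfe]; exact List.cons_prefix_cons.mpr ⟨rfl, this⟩)

theorem pv_foldnil : ∀ L, (∀ e ∈ L, e ∈ pvTableC) → pvFoldC [] L = [] := by
  intro L
  induction L with
  | nil => intro _; rfl
  | cons e L' IH =>
    intro hsub
    simp only [pvFoldC, List.foldl_cons]
    rw [pv_replace_nil _ _ (pv_keyne (hsub e (by simp)))]
    exact IH (fun f hf => hsub f (by simp [hf]))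

theorem pv_main : ∀ n s, s.length ≤ n → pvFoldC s pvTableC = pvScan s := by
  intro n
  induction n with
  | zero =>
    intro s hs
    have : s = [] := by cases s <;> simp_all
    subst this
    rw [pv_foldnil pvTableC (fun e he => he)]
    simp [pvScan]
  | succ n IH =>
    intro s hs
    rcases h : pvLookup s with _ | e
    · -- no pattern matches at the head of s
      have h'' : List.find? (fun f => f.1.isPrefixOf s) pvTableC = none := h
      have hnone := List.find?_eq_none.mp h''
      cases s with
      | nil =>
        rw [pv_foldnil pvTableC (fun e he => he)]; simp [pvScan]
      | cons c t =>
        have hcond : ∀ f ∈ pvTableC, ¬ f.1 <+: c :: t := by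
          intro f hf hpref
          exact (hnone f hf) ((PySem.Chars.startswith_iff (c :: t) f.1).mpr hpref)
        rw [pv_foldcons pvTableC (fun e he => he) c t hcond, IH t (by simp at hs; omega)]
        show _ = pvScan (c :: t)
        rw [pvScan]
        rw [show pvLookup (c :: t) = none from h]
    · -- e is the (unique) table entry matching at the head of s
      have h'' : List.find? (fun f => f.1.isPrefixOf s) pvTableC = some e := h
      have hq : e.1 <+: s := by
        have := List.find?_some h''
        simpa using this
      rcases List.find?_eq_some_iff_append.mp h'' with ⟨-, T₁, T₂, htab, hT₁⟩
      have hmemE : e ∈ pvTableC := List.mem_of_find?_eq_some h''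
      have hq2 : 2 ≤ e.1.length := pvF_len e hmemE
      have hqne : e.1 ≠ [] := pv_keyne hmemE
      have hsub1 : ∀ f ∈ T₁, f ∈ pvTableC := by
        intro f hf; rw [htab]; simp [hf]
      have hsub2 : ∀ f ∈ T₂, f ∈ pvTableC := by
        intro f hf; rw [htab]; simp [hf]
      set t := s.drop e.1.length with hteq
      have hsplit : e.1 ++ t = s := List.prefix_iff_eq_append.mp hq
      -- condition for walking T₁ past the block e.1
      have hcond1 : ∀ f ∈ T₁, ∀ k, k < e.1.length → ∀ t', ¬ f.1 <+: (e.1.drop k ++ t') := by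
        intro f hf k hk t' hpref
        have hfT : f ∈ pvTableC := hsub1 f hf
        have hfns : ¬ f.1 <+: s := by
          intro hps
          exact absurd ((PySem.Chars.startswith_iff s f.1).mpr hps) (by simpa using hT₁ f hf)
        rcases Nat.eq_zero_or_pos k with hk0 | hk1
        · subst hk0
          simp only [List.drop_zero] at hpref
          rcases pv_prefix_split hpref with h1 | h1
          · exact hfns (h1.trans hq)
          · by_cases hfe : e.1 = f.1
            · exact hfns (hfe ▸ hq)
            · exact pvF_pairs e hmemE f hfT hfe h1
        · have hxX : e.1.drop k ∈ pvX := by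
            rcases e with ⟨e1, e2⟩
            exact pv_mem_X_drop hmemE hk1
          have hxne : e.1.drop k ≠ [] := by
            intro hnil
            have : e.1.length - k = 0 := by
              have := List.length_drop (l := e.1) (i := k); simp [hnil] at this; omega
            omega
          have hXf := (pvF_X _ hxX).resolve_left hxne f hfT
          rcases pv_prefix_split hpref with h1 | h1
          · exact hXf.2.1 h1
          · exact hXf.1 h1
      -- condition for walking T₂ past the block e.2
      have hcond2 : ∀ f ∈ T₂, ∀ k, k < e.2.length → ∀ t', ¬ f.1 <+: (e.2.drop k ++ t') := by
        intro f hf k hk t' hpref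
        have hfT : f ∈ pvTableC := hsub2 f hf
        have hxt : e.2.drop k ∈ e.2.tails := (List.mem_tails _ _).mpr (List.drop_suffix _ _)
        have hxne : e.2.drop k ≠ [] := by
          intro hnil
          have := List.length_drop (l := e.2) (i := k); simp [hnil] at this; omega
        have hRf := pvF_rep e hmemE _ hxt hxne f hfT
        rcases pv_prefix_split hpref with h1 | h1
        · exact hRf.1 h1
        · exact hRf.2 h1
      -- assemble
      have htlen : t.length ≤ n := by
        have hdl : t.length = s.length - e.1.length := by rw [hteq, List.length_drop]
        have hqlen := hq.length_le
        omega
      calc pvFoldC s pvTableC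
          = pvFoldC s (T₁ ++ e :: T₂) := by rw [← htab]
        _ = pvFoldC (PySem.Chars.replace (pvFoldC s T₁) e.1 e.2) T₂ := by
            simp [pvFoldC, List.foldl_append]
        _ = pvFoldC (PySem.Chars.replace (e.1 ++ pvFoldC t T₁) e.1 e.2) T₂ := by
            rw [show pvFoldC s T₁ = e.1 ++ pvFoldC t T₁ by
              rw [← hsplit]; exact pv_foldapp T₁ hsub1 e.1 hcond1 t]
        _ = pvFoldC (e.2 ++ PySem.Chars.replace (pvFoldC t T₁) e.1 e.2) T₂ := by
            rw [pv_replace_pos e.1 e.2 _ hqne (List.prefix_append _ _), List.drop_left]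
        _ = e.2 ++ pvFoldC (PySem.Chars.replace (pvFoldC t T₁) e.1 e.2) T₂ :=
            pv_foldapp T₂ hsub2 e.2 hcond2 _
        _ = e.2 ++ pvFoldC t (T₁ ++ e :: T₂) := by
            simp [pvFoldC, List.foldl_append]
        _ = e.2 ++ pvScan t := by rw [← htab, IH t htlen]
        _ = pvScan s := by
            cases s with
            | nil => exact absurd (List.eq_nil_of_prefix_nil hq) hqne
            | cons c t₀ =>
              rw [pvScan]
              rw [show pvLookup (c :: t₀) = some e from h]
              congr 1
              rw [hteq]
              cases hql : e.1.length with
              | zero => omega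
              | succ m => simp [List.drop_succ_cons]

-- bridge A's String-level loop to the code-point-level fold
theorem pv_A_eq_fold (content : String) :
    fix_spacing_consistency content = String.ofList (pvFoldC content.toList pvTableC) := by
  rw [pvTableC_eq]
  simp [fix_spacing_consistency, pvFoldC, PySem.Str.replace, List.foldl,
    String.toList_ofList]

-- ===== VERDICT (by name: the statement is the Claim_ definition above) =====
theorem fix_spacing_consistency_spec : Claim_equal_fix_spacing_consistency := by
  intro content _
  show fix_spacing_consistency content = fix_spacing_consistency_alt content
  rw [pv_A_eq_fold content,
      pv_main content.toList.length content.toList (le_refl _)]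
  rfl
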